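-- pv_equiv track=rewrite | github.com/nghiatt90/cs-practice | codesignal/dancesteps.py | f
-- ===== SOURCE A (Python) =====
-- def f(r, i, v, a):
-- 	if i < 0 or i >= len(a) or a[i] == 0:
-- 		return r
-- 	if v[i] == 1:
-- 		return -1
-- 	v[i] = 1
-- 	if a[i] % 2 == 1:
-- 		r = r + min(a[i], i)
-- 		i = i - a[i]
-- 	else:
-- 		r = r + min(a[i], len(a) - i - 1)
-- 		i = i + a[i]
-- 	return f(r, i, v, a)
-- ===== SOURCE B (Python) =====
-- def f(r, i, v, a):
--     n = len(a)
--     steps = [(min(x, j), j - x) if x % 2 else (min(x, n - j - 1), j + x)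
--              for j, x in enumerate(a)]
--     while 0 <= i < n and a[i] != 0:
--         if v[i] == 1:
--             return -1
--         v[i] = 1
--         c, i2 = steps[i]
--         r += c
--         i = i2
--     return r
-- ===== Notes on version B (the rewrite author's own statement) =====
-- stated objective: alternative
-- what changed: Replaces A's tail recursion by a while loop driven by a precomputed (cost, next-index) table built once from the array, instead of recomputing the parity branch and min() at every visit.
-- outside the precondition, e.g. on f(0, 0, [0], [1, 5]): A returns 0, B returns 0
import Mathlib
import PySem

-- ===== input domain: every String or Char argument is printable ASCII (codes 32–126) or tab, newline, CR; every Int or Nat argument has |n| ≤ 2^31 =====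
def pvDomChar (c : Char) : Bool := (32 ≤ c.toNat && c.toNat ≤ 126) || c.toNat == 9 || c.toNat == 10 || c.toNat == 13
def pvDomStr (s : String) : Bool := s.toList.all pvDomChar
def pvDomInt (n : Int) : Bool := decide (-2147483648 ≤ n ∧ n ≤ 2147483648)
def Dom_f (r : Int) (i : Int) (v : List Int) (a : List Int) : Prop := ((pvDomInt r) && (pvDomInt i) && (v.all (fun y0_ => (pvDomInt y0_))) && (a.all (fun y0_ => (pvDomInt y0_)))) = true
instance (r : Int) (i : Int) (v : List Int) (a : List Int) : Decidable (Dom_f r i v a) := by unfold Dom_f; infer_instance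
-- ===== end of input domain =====

-- B rewrites A's tail recursion as a while loop over a precomputed (cost, next-index) table.
-- Both A and B mutate v in place in Python (the same writes); the equivalence proved is about the return value.

-- ===== PORT A =====
-- A's tail recursion; the fuel argument is only a totality guard (under Pre_f the walk
-- marks a fresh slot of v at every step, so v.length + 1 steps always suffice).
def fRec : Nat → Int → Int → List Int → List Int → Int
  | 0, r, _, _, _ => r
  | fuel + 1, r, i, v, a =>
    if i < 0 ∨ (a.length : Int) ≤ i ∨ PySem.List.pyGetD a i 0 = 0 then r
    else if PySem.List.pyGetD v i 0 = 1 then -1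
    else
      let ai := PySem.List.pyGetD a i 0
      let v' := PySem.List.pySetD v i 1
      if PySem.Int.mod ai 2 = 1 then
        fRec fuel (r + min ai i) (i - ai) v' a
      else
        fRec fuel (r + min ai ((a.length : Int) - i - 1)) (i + ai) v' a

def f (r : Int) (i : Int) (v : List Int) (a : List Int) : Int :=
  fRec (v.length + 1) r i v a

-- ===== PORT B =====
-- the per-index (cost, next index) table B builds once
def stepTable (a : List Int) : List (Int × Int) :=
  (PySem.List.enumerate a).map (fun jx =>
    if PySem.Int.mod jx.2 2 ≠ 0 then (min jx.2 jx.1, jx.1 - jx.2)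
    else (min jx.2 ((a.length : Int) - jx.1 - 1), jx.1 + jx.2))

-- B's while loop; fuel is the same totality guard as in A's port.
def fAltLoop : Nat → List (Int × Int) → List Int → Int → Int → Int → List Int → Int
  | 0, _, _, _, r, _, _ => r
  | fuel + 1, steps, a, n, r, i, v =>
    if 0 ≤ i ∧ i < n ∧ PySem.List.pyGetD a i 0 ≠ 0 then
      if PySem.List.pyGetD v i 0 = 1 then -1
      else
        let v' := PySem.List.pySetD v i 1
        let p := PySem.List.pyGetD steps i (0, 0)
        fAltLoop fuel steps a n (r + p.1) p.2 v'
    else r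

def f_alt (r : Int) (i : Int) (v : List Int) (a : List Int) : Int :=
  fAltLoop (v.length + 1) (stepTable a) a (a.length : Int) r i v

-- ===== PRECONDITION & SPEC =====
-- Pre_f excludes calls where v is shorter than a (except the immediate-return positions):
-- Python A raises IndexError whenever the walk reaches an index ≥ len(v), and a closed-form
-- condition cannot trace the walk, so some short-v calls on which A still returns are excluded too.
def Pre_f (r : Int) (i : Int) (v : List Int) (a : List Int) : Prop :=
  (i < 0 ∨ (a.length : Int) ≤ i ∨ PySem.List.pyGet? a i = some 0) ∨ a.length ≤ v.length
instance (r : Int) (i : Int) (v : List Int) (a : List Int) : Decidable (Pre_f r i v a) := by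
  unfold Pre_f; infer_instance

def pvWitness_f : Int × Int × List Int × List Int := (0, 0, [0, 0, 0], [2, 3, 1])

def Spec_f (r : Int) (i : Int) (v : List Int) (a : List Int) (out : Int) : Prop := out = f_alt r i v a
instance (r : Int) (i : Int) (v : List Int) (a : List Int) (out : Int) : Decidable (Spec_f r i v a out) := by unfold Spec_f; infer_instance

-- ===== CLAIM (what is proved, stated in full; the proofs are below) =====
def Claim_equal_f : Prop := ∀ (r : Int) (i : Int) (v : List Int) (a : List Int), Dom_f r i v a → Pre_f r i v a → Spec_f r i v a (f r i v a)

-- ===== LEMMAS AND PROOFS =====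

-- table lookup = the direct computation, for indices inside the array
theorem stepTable_lookup (a : List Int) (i : Int) (h0 : 0 ≤ i) (h1 : i < (a.length : Int)) :
    PySem.List.pyGetD (stepTable a) i (0, 0) =
      (if PySem.Int.mod (PySem.List.pyGetD a i 0) 2 ≠ 0 then
        (min (PySem.List.pyGetD a i 0) i, i - PySem.List.pyGetD a i 0)
      else
        (min (PySem.List.pyGetD a i 0) ((a.length : Int) - i - 1), i + PySem.List.pyGetD a i 0)) := by
  have hlen : i.toNat < a.length := by omega
  have hlen' : i.toNat < (stepTable a).length := by
    simp [stepTable, PySem.List.length_enumerate]; omega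
  rw [PySem.List.pyGetD_eq_getElem _ _ h0 (by simpa [stepTable, PySem.List.length_enumerate] using h1),
      PySem.List.pyGetD_eq_getElem _ _ h0 h1]
  simp only [stepTable, List.getElem_map, PySem.List.getElem_enumerate]
  have : (0 : Int) + (i.toNat : Int) = i := by omega
  rw [this]

-- the two loops agree for every fuel
theorem fRec_eq_fAltLoop (fuel : Nat) (r i : Int) (v a : List Int) :
    fRec fuel r i v a = fAltLoop fuel (stepTable a) a (a.length : Int) r i v := by
  induction fuel generalizing r i v with
  | zero => rfl
  | succ fuel ih =>
    simp only [fRec, fAltLoop]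
    by_cases hg : i < 0 ∨ (a.length : Int) ≤ i ∨ PySem.List.pyGetD a i 0 = 0
    · rw [if_pos hg, if_neg (by
        intro hc
        obtain ⟨hc0, hc1, hc2⟩ := hc
        rcases hg with h | h | h
        · omega
        · omega
        · exact hc2 h)]
    · have h0 : 0 ≤ i := by by_contra h; exact hg (Or.inl (by omega))
      have h1 : i < (a.length : Int) := by by_contra h; exact hg (Or.inr (Or.inl (by omega)))
      have h2 : PySem.List.pyGetD a i 0 ≠ 0 := fun h => hg (Or.inr (Or.inr h))
      rw [if_neg hg, if_pos (And.intro h0 (And.intro h1 h2))]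
      by_cases hv : PySem.List.pyGetD v i 0 = 1
      · rw [if_pos hv, if_pos hv]
      · rw [if_neg hv, if_neg hv]
        rw [stepTable_lookup a i h0 h1]
        rcases PySem.Int.mod_two_eq (PySem.List.pyGetD a i 0) with hm | hm
        · rw [if_neg (by rw [hm]; decide), if_neg (fun h => h hm)]
          exact ih _ _ _
        · rw [if_pos hm, if_pos (by rw [hm]; decide)]
          exact ih _ _ _

-- ===== VERDICT (by name: the statement is the Claim_ definition above) =====
theorem f_spec : Claim_equal_f := by
  intro r i v a _ _
  unfold Spec_f f f_alt
  exact fRec_eq_fAltLoop (v.length + 1) r i v a
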